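-- pv_equiv track=rewrite | github.com/Zhantongoscar/lbgraph | relay_type_system.py | _determine_connection_type
-- ===== SOURCE A (Python) =====
-- def _determine_connection_type(device_path: str) -> str:
--     """
--     确定设备的连接类型
--     - ctrl: 如果设备路径中包含-K*、-Q*或-S*组件
--     - direct: 其他设备
--     例如:
--     A01+K1.H2-K1      -> ctrl （包含-K1）
--     A01+K1.B1-W5(-P1) -> direct （没有-K*/-Q*/-S*）
--     """
--     if not device_path:
--         return 'direct'
--
--     parts = device_path.split('-')
--     for part in parts[1:]:  # 跳过第一个部分（因为它通常是区域标识）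
--         # 去除可能的括号内容
--         clean_part = part.split('(')[0]
--         if ((clean_part.startswith('K') or
--              clean_part.startswith('Q') or
--              clean_part.startswith('S')) and
--             any(c.isdigit() for c in clean_part)):
--             return 'ctrl'
--     return 'direct'
-- ===== SOURCE B (Python) =====
-- def _determine_connection_type(device_path: str) -> str:
--     # Single left-to-right pass over the characters with a 3-state machine:
--     # SKIP = inside a segment that cannot match, DASH = just crossed a '-',
--     # CAND = inside a '-K/Q/S...' segment, before any '(' -- a digit here means 'ctrl'.
--     SKIP, DASH, CAND = 0, 1, 2
--     state = SKIP
--     for c in device_path: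
--         if state == SKIP:
--             if c == '-':
--                 state = DASH
--         elif state == DASH:
--             if c == '-':
--                 pass
--             elif c in 'KQS':
--                 state = CAND
--             else:
--                 state = SKIP
--         else:  # CAND
--             if c == '-':
--                 state = DASH
--             elif c == '(':
--                 state = SKIP
--             elif c.isdigit():
--                 return 'ctrl'
--     return 'direct'
-- ===== Notes on version B (the rewrite author's own statement) =====
-- stated objective: alternative
-- what changed: Replaced split-on-'-' plus per-part split-on-'(' / startswith / any-digit scanning with a single left-to-right pass over the characters driven by a 3-state machine (skip / after-dash / candidate-segment).
import Mathlib
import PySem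

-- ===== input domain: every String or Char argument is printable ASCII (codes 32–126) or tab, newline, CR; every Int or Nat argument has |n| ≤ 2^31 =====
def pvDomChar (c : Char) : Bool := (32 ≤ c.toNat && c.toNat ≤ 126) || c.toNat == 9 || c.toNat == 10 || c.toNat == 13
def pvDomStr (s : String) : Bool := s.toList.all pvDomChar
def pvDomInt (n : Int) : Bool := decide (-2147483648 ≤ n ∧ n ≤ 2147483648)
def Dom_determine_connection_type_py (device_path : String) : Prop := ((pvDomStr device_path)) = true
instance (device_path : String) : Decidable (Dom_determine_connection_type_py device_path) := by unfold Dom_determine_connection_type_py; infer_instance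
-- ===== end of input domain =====

-- B replaces A's split-on-'-' part scan by a single character-level 3-state machine; alternative decomposition, same O(n) cost.

-- ===== PORT A =====
-- the loop 'for part in parts[1:]: …' with its early return 'ctrl'
def pvLoopA : List (List Char) → String
  | [] => "direct"
  | part :: rest =>
      -- clean_part = part.split('(')[0]  (Python's split always returns a non-empty list, so [0] is headI)
      let clean := (PySem.Chars.splitOn part ['(']).headI
      if ((PySem.Chars.startswith clean ['K'] || PySem.Chars.startswith clean ['Q']
            || PySem.Chars.startswith clean ['S'])
          && clean.any PySem.Chars.isdigit) then "ctrl"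
      else pvLoopA rest

def determine_connection_type_py (device_path : String) : String :=
  if device_path = "" then "direct"
  else pvLoopA ((PySem.Chars.splitOn device_path.toList ['-']).drop 1)

-- ===== PORT B =====
-- state 0 = SKIP, 1 = DASH (just crossed '-'), 2 = CAND (inside a '-K/Q/S…' segment before '(')
def pvBGo : Nat → List Char → String
  | _, [] => "direct"
  | 0, c :: r => if c = '-' then pvBGo 1 r else pvBGo 0 r
  | 1, c :: r =>
      if c = '-' then pvBGo 1 r
      else if c = 'K' || c = 'Q' || c = 'S' then pvBGo 2 r
      else pvBGo 0 r
  | _ + 2, c :: r =>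
      if c = '-' then pvBGo 1 r
      else if c = '(' then pvBGo 0 r
      else if PySem.Chars.isdigit c then "ctrl"
      else pvBGo 2 r

def determine_connection_type_py_alt (device_path : String) : String :=
  pvBGo 0 device_path.toList

-- ===== PRECONDITION & SPEC =====
def Spec_determine_connection_type_py (device_path : String) (out : String) : Prop := out = determine_connection_type_py_alt device_path
instance (device_path : String) (out : String) : Decidable (Spec_determine_connection_type_py device_path out) := by unfold Spec_determine_connection_type_py; infer_instance

-- ===== CLAIM (what is proved, stated in full; the proofs are below) =====
def Claim_equal_determine_connection_type_py : Prop := ∀ (device_path : String), Dom_determine_connection_type_py device_path → Spec_determine_connection_type_py device_path (determine_connection_type_py device_path)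

-- ===== LEMMAS AND PROOFS =====

-- characterisation of PySem.Chars.splitOn with a single-character separator
def pvSplit (d : Char) : List Char → List (List Char)
  | [] => [[]]
  | c :: cs => if c = d then [] :: pvSplit d cs
               else (c :: (pvSplit d cs).headI) :: (pvSplit d cs).tail

lemma pvSplit_ne_nil (d : Char) (cs : List Char) : pvSplit d cs ≠ [] := by
  cases cs with
  | nil => simp [pvSplit]
  | cons c r => simp only [pvSplit]; split_ifs <;> simp

lemma pvSplit_cons_self (d : Char) (cs : List Char) :
    (pvSplit d cs).headI :: (pvSplit d cs).tail = pvSplit d cs := by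
  cases h : pvSplit d cs with
  | nil => exact absurd h (pvSplit_ne_nil d cs)
  | cons a l => simp

lemma splitOn_go_eq (d : Char) : ∀ (l : List Char) (fuel : Nat), l.length < fuel →
    ∀ (cur : List Char) (acc : List (List Char)),
    PySem.Chars.splitOn.go [d] fuel l cur acc =
      acc.reverse ++ (cur.reverse ++ (pvSplit d l).headI) :: (pvSplit d l).tail := by
  intro l
  induction l with
  | nil =>
      intro fuel h cur acc
      match fuel, h with
      | f + 1, _ => simp [PySem.Chars.splitOn.go, pvSplit]
  | cons c cs ih =>
      intro fuel h cur acc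
      match fuel, h with
      | f + 1, h =>
        have hf : cs.length < f := by simpa using h
        by_cases hcd : c = d
        · subst hcd
          have hpre : List.isPrefixOf [c] (c :: cs) = true := by simp [List.isPrefixOf]
          rw [show PySem.Chars.splitOn.go [c] (f + 1) (c :: cs) cur acc =
                PySem.Chars.splitOn.go [c] f (List.drop (List.length [c]) (c :: cs)) [] (cur.reverse :: acc) by
              simp [PySem.Chars.splitOn.go, hpre]]
          simp only [List.length_singleton, List.drop_succ_cons, List.drop_zero]
          rw [ih f hf [] (cur.reverse :: acc)]
          simp [pvSplit, pvSplit_cons_self]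
        · have hpre : List.isPrefixOf [d] (c :: cs) = false := by
            simp [List.isPrefixOf]
            exact fun hh => absurd hh.symm hcd
          rw [show PySem.Chars.splitOn.go [d] (f + 1) (c :: cs) cur acc =
                PySem.Chars.splitOn.go [d] f cs (c :: cur) acc by
              simp [PySem.Chars.splitOn.go, hpre]]
          rw [ih f hf (c :: cur) acc]
          simp [pvSplit, hcd]

lemma splitOn_single_eq (d : Char) (cs : List Char) :
    PySem.Chars.splitOn cs [d] = pvSplit d cs := by
  unfold PySem.Chars.splitOn
  rw [splitOn_go_eq d cs (cs.length + 1) (by omega) [] []]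
  simp [pvSplit_cons_self]

lemma splitOn_single_cons (d c : Char) (cs : List Char) :
    PySem.Chars.splitOn (c :: cs) [d] =
      if c = d then [] :: PySem.Chars.splitOn cs [d]
      else (c :: (PySem.Chars.splitOn cs [d]).headI) :: (PySem.Chars.splitOn cs [d]).tail := by
  simp [splitOn_single_eq, pvSplit]

lemma splitOn_single_nil (d : Char) : PySem.Chars.splitOn [] [d] = [[]] := by
  simp [splitOn_single_eq, pvSplit]

-- clean_part = part.split('(')[0] is the prefix of the part before the first '('
lemma clean_eq_takeWhile (part : List Char) :
    (PySem.Chars.splitOn part ['(']).headI = part.takeWhile (fun c => c ≠ '(') := by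
  induction part with
  | nil => simp [splitOn_single_nil]
  | cons c cs ih =>
      rw [splitOn_single_cons]
      by_cases h : c = '('
      · simp [h, List.takeWhile]
      · simp [h, List.takeWhile, ih]

lemma startswith_single_cons (c k : Char) (l : List Char) :
    PySem.Chars.startswith (c :: l) [k] = (c == k) := by
  simp [PySem.Chars.startswith, List.isPrefixOf, BEq.comm]

-- the three machine states against A's part list
lemma pvBGo_triple (cs : List Char) :
    pvBGo 0 cs = pvLoopA ((PySem.Chars.splitOn cs ['-']).tail)
  ∧ pvBGo 1 cs = pvLoopA (PySem.Chars.splitOn cs ['-'])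
  ∧ pvBGo 2 cs =
      (if (((PySem.Chars.splitOn cs ['-']).headI.takeWhile (fun c => c ≠ '(')).any PySem.Chars.isdigit)
       then "ctrl" else pvLoopA ((PySem.Chars.splitOn cs ['-']).tail)) := by
  induction cs with
  | nil =>
      refine ⟨rfl, ?_, ?_⟩ <;>
        simp [pvBGo, splitOn_single_nil, pvLoopA, PySem.Chars.startswith]
  | cons c cs ih =>
      obtain ⟨h0, h1, h2⟩ := ih
      by_cases hd : c = '-'
      · subst hd
        refine ⟨?_, ?_, ?_⟩ <;>
          simp [pvBGo, splitOn_single_cons, h1, pvLoopA, clean_eq_takeWhile,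
                PySem.Chars.startswith]
      · have hsp := splitOn_single_cons '-' c cs
        rw [if_neg hd] at hsp
        refine ⟨?_, ?_, ?_⟩
        · -- state SKIP
          rw [show pvBGo 0 (c :: cs) = pvBGo 0 cs by simp [pvBGo, hd], hsp]
          simpa using h0
        · -- state DASH
          rw [hsp]
          by_cases hK : c = 'K' ∨ c = 'Q' ∨ c = 'S'
          · have hne : c ≠ '(' := by rcases hK with h | h | h <;> subst h <;> decide
            have hnd : PySem.Chars.isdigit c = false := by
              rcases hK with h | h | h <;> subst h <;> decide
            rw [show pvBGo 1 (c :: cs) = pvBGo 2 cs by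
              rcases hK with h | h | h <;> subst h <;> simp [pvBGo]]
            simp [pvLoopA, clean_eq_takeWhile, List.takeWhile, hne,
                  PySem.Chars.startswith, List.isPrefixOf, hnd, h2]
            rcases hK with h | h | h <;> subst h <;> simp
          · have hk : c ≠ 'K' := fun h => hK (Or.inl h)
            have hq : c ≠ 'Q' := fun h => hK (Or.inr (Or.inl h))
            have hs : c ≠ 'S' := fun h => hK (Or.inr (Or.inr h))
            rw [show pvBGo 1 (c :: cs) = pvBGo 0 cs by simp [pvBGo, hd, hk, hq, hs]]
            rw [h0]
            by_cases hp : c = '('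
            · subst hp
              simp [pvLoopA, clean_eq_takeWhile, List.takeWhile,
                    PySem.Chars.startswith]
            · simp [pvLoopA, clean_eq_takeWhile, List.takeWhile, hp,
                    startswith_single_cons, hk, hq, hs]
        · -- state CAND
          rw [hsp]
          by_cases hp : c = '('
          · subst hp
            rw [show pvBGo 2 ('(' :: cs) = pvBGo 0 cs by simp [pvBGo]]
            simp [h0]
          · by_cases hdig : PySem.Chars.isdigit c = true
            · rw [show pvBGo 2 (c :: cs) = "ctrl" by simp [pvBGo, hd, hp, hdig]]
              simp [hp, hdig]
            · rw [show pvBGo 2 (c :: cs) = pvBGo 2 cs by simp [pvBGo, hd, hp, hdig]]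
              simp [hp, hdig, h2]

-- ===== VERDICT (by name: the statement is the Claim_ definition above) =====
theorem determine_connection_type_py_spec : Claim_equal_determine_connection_type_py := by
  intro s _
  unfold Spec_determine_connection_type_py determine_connection_type_py determine_connection_type_py_alt
  by_cases h : s = ""
  · subst h; simp [pvBGo]
  · rw [if_neg h, (pvBGo_triple s.toList).1, List.drop_one]
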